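-- pv_equiv track=rewrite | github.com/BuczynskiRafal/ltc-hydrology-flood-prediction | src/select_features.py | build_feature_categories
-- ===== SOURCE A (Python) =====
-- def build_feature_categories(feature_names):
--     temporal_features = {
--         "API",
--         "tau_event",
--         "hour_sin",
--         "hour_cos",
--         "dow_0",
--         "dow_1",
--         "dow_2",
--         "dow_3",
--         "dow_4",
--         "dow_5",
--         "dow_6",
--         "month_sin",
--         "month_cos",
--     }
--
--     return {
--         "Normalized Sensors": [name for name in feature_names if "_norm" in name],
--         "Rain Features": [
--             name
--             for name in feature_names
--             if "rain" in name.lower() or name in {"I_t", "P_t"}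
--         ],
--         "Flow (Q_in)": [name for name in feature_names if "Q_in" in name],
--         "Velocities": [name for name in feature_names if "_velocity" in name],
--         "Gradients": [name for name in feature_names if "gradient" in name],
--         "Accelerations": [name for name in feature_names if "_acceleration" in name],
--         "Temporal": [name for name in feature_names if name in temporal_features],
--     }
-- ===== SOURCE B (Python) =====
-- def build_feature_categories(feature_names):
--     temporal_features = {
--         "API", "tau_event", "hour_sin", "hour_cos",
--         "dow_0", "dow_1", "dow_2", "dow_3", "dow_4", "dow_5", "dow_6",
--         "month_sin", "month_cos",
--     }
--     buckets = {
--         "Normalized Sensors": [],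
--         "Rain Features": [],
--         "Flow (Q_in)": [],
--         "Velocities": [],
--         "Gradients": [],
--         "Accelerations": [],
--         "Temporal": [],
--     }
--     for name in feature_names:
--         if "_norm" in name:
--             buckets["Normalized Sensors"].append(name)
--         if "rain" in name.lower() or name in {"I_t", "P_t"}:
--             buckets["Rain Features"].append(name)
--         if "Q_in" in name:
--             buckets["Flow (Q_in)"].append(name)
--         if "_velocity" in name:
--             buckets["Velocities"].append(name)
--         if "gradient" in name:
--             buckets["Gradients"].append(name)
--         if "_acceleration" in name:
--             buckets["Accelerations"].append(name)
--         if name in temporal_features: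
--             buckets["Temporal"].append(name)
--     return buckets
-- ===== Notes on version B (the rewrite author's own statement) =====
-- stated objective: faster
-- what changed: Seven independent comprehension scans over feature_names are replaced by a single pass that dispatches each name into pre-created buckets, appending it to every category whose predicate matches.
import Mathlib
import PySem

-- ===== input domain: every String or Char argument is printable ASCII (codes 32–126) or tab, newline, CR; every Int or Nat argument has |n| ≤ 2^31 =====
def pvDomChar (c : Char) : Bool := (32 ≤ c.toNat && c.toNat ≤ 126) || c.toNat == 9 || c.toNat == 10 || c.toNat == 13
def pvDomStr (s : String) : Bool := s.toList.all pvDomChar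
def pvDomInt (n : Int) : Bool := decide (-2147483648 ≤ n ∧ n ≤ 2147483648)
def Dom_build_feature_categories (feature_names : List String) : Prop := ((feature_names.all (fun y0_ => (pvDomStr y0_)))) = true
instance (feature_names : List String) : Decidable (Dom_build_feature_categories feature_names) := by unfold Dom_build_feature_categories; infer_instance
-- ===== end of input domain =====

-- B replaces A's seven independent list-comprehension scans with one pass that appends
-- each name to every matching bucket (objective: faster by a constant factor, one traversal).

-- ===== PORT A =====
def bfcTemporal : PySem.Set String :=
  PySem.Set.ofList ["API", "tau_event", "hour_sin", "hour_cos", "dow_0", "dow_1",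
    "dow_2", "dow_3", "dow_4", "dow_5", "dow_6", "month_sin", "month_cos"]

def build_feature_categories (feature_names : List String) : List (String × List String) :=
  let temporal_features := bfcTemporal
  [("Normalized Sensors", feature_names.filter (fun name => PySem.Str.isIn "_norm" name)),
   ("Rain Features", feature_names.filter (fun name =>
      PySem.Str.isIn "rain" (PySem.Str.lower name) ||
      PySem.Set.contains (PySem.Set.ofList ["I_t", "P_t"]) name)),
   ("Flow (Q_in)", feature_names.filter (fun name => PySem.Str.isIn "Q_in" name)),
   ("Velocities", feature_names.filter (fun name => PySem.Str.isIn "_velocity" name)),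
   ("Gradients", feature_names.filter (fun name => PySem.Str.isIn "gradient" name)),
   ("Accelerations", feature_names.filter (fun name => PySem.Str.isIn "_acceleration" name)),
   ("Temporal", feature_names.filter (fun name => PySem.Set.contains temporal_features name))]

-- ===== PORT B =====
-- the seven buckets, in the dict's insertion order (state of B's single loop)
abbrev BfcBuckets := List String × List String × List String × List String × List String × List String × List String

def bfcStep (acc : BfcBuckets) (name : String) : BfcBuckets :=
  let (n, r, q, v, g, a, t) := acc
  ((if PySem.Str.isIn "_norm" name then n ++ [name] else n),
   (if PySem.Str.isIn "rain" (PySem.Str.lower name) ||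
       PySem.Set.contains (PySem.Set.ofList ["I_t", "P_t"]) name then r ++ [name] else r),
   (if PySem.Str.isIn "Q_in" name then q ++ [name] else q),
   (if PySem.Str.isIn "_velocity" name then v ++ [name] else v),
   (if PySem.Str.isIn "gradient" name then g ++ [name] else g),
   (if PySem.Str.isIn "_acceleration" name then a ++ [name] else a),
   (if PySem.Set.contains bfcTemporal name then t ++ [name] else t))

def build_feature_categories_alt (feature_names : List String) : List (String × List String) :=
  let (n, r, q, v, g, a, t) := feature_names.foldl bfcStep ([], [], [], [], [], [], [])
  [("Normalized Sensors", n), ("Rain Features", r), ("Flow (Q_in)", q),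
   ("Velocities", v), ("Gradients", g), ("Accelerations", a), ("Temporal", t)]

-- ===== PRECONDITION & SPEC =====
def Spec_build_feature_categories (feature_names : List String) (out : List (String × List String)) : Prop := out = build_feature_categories_alt feature_names
instance (feature_names : List String) (out : List (String × List String)) : Decidable (Spec_build_feature_categories feature_names out) := by unfold Spec_build_feature_categories; infer_instance

-- ===== CLAIM (what is proved, stated in full; the proofs are below) =====
def Claim_equal_build_feature_categories : Prop := ∀ (feature_names : List String), Dom_build_feature_categories feature_names → Spec_build_feature_categories feature_names (build_feature_categories feature_names)

-- ===== LEMMAS AND PROOFS =====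
theorem bfc_app_if {α : Type} (c : Prop) [Decidable c] (n : List α) (x : α) (l : List α) :
    (if c then n ++ [x] else n) ++ l = n ++ (if c then x :: l else l) := by
  split <;> simp

-- B's single loop computes, in each bucket, the append of the initial bucket with the filter A takes
theorem bfcStep_foldl (l : List String) (acc : BfcBuckets) :
    l.foldl bfcStep acc =
      (acc.1 ++ l.filter (fun name => PySem.Str.isIn "_norm" name),
       acc.2.1 ++ l.filter (fun name =>
         PySem.Str.isIn "rain" (PySem.Str.lower name) ||
         PySem.Set.contains (PySem.Set.ofList ["I_t", "P_t"]) name),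
       acc.2.2.1 ++ l.filter (fun name => PySem.Str.isIn "Q_in" name),
       acc.2.2.2.1 ++ l.filter (fun name => PySem.Str.isIn "_velocity" name),
       acc.2.2.2.2.1 ++ l.filter (fun name => PySem.Str.isIn "gradient" name),
       acc.2.2.2.2.2.1 ++ l.filter (fun name => PySem.Str.isIn "_acceleration" name),
       acc.2.2.2.2.2.2 ++ l.filter (fun name => PySem.Set.contains bfcTemporal name)) := by
  induction l generalizing acc with
  | nil => simp
  | cons x xs ih =>
    obtain ⟨n, r, q, v, g, a, t⟩ := acc
    simp only [List.foldl_cons, ih, bfcStep, List.filter_cons]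
    simp only [bfc_app_if]

-- ===== VERDICT (by name: the statement is the Claim_ definition above) =====
theorem build_feature_categories_spec : Claim_equal_build_feature_categories := by
  intro feature_names _
  unfold Spec_build_feature_categories build_feature_categories build_feature_categories_alt
  rw [bfcStep_foldl]
  simp
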